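-- pv_equiv track=rewrite | github.com/libp2p/py-libp2p | libp2p/transport/webrtc/private_to_public/util.py | munge_offer
-- ===== SOURCE A (Python) =====
-- def munge_offer(sdp: str, ufrag: str, ice_pwd: str) -> str:
--     """
--     Munge SDP offer
--
--     Parameters
--     ----------
--     sdp : str
--         The SDP string to be munged.
--     ufrag : str
--         The ICE username fragment to insert.
--     ice_pwd : str
--         The ICE password to insert (must satisfy RFC 8445 length requirements).
--
--     Returns
--     -------
--     str
--         The munged SDP string.
--
--     """
--     if sdp is None:
--         raise ValueError("Can't munge a missing SDP")
--
--     # Determine line break style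
--     line_break = "\r\n" if "\r\n" in sdp else "\n"
--
--     # Split SDP into lines for easier manipulation
--     lines = sdp.splitlines(keepends=True)
--     new_lines = []
--
--     for line in lines:
--         if line.startswith("a=ice-ufrag:"):
--             new_lines.append(f"a=ice-ufrag:{ufrag}{line_break}")
--         elif line.startswith("a=ice-pwd:"):
--             new_lines.append(f"a=ice-pwd:{ice_pwd}{line_break}")
--         else:
--             new_lines.append(line)
--
--     return "".join(new_lines)
-- ===== SOURCE B (Python) =====
-- import re
--
-- # One regex-substitution pass over the whole SDP instead of split/loop/join.
-- # The lookbehind alternative (?:^|(?<=[\r\n])) anchors matches exactly at line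
-- # starts (start of string or after \n / \r), the body consumes the rest of the
-- # line plus its optional terminator, and the replacement FUNCTION inserts the
-- # user-supplied values literally (no backslash/group interpretation) with the
-- # normalised line break, exactly as A does.
-- _ICE_LINE = re.compile(r"(?:^|(?<=[\r\n]))a=ice-(ufrag|pwd):[^\r\n]*(?:\r\n|\r|\n)?")
--
-- def munge_offer(sdp: str, ufrag: str, ice_pwd: str) -> str:
--     if sdp is None:
--         raise ValueError("Can't munge a missing SDP")
--     line_break = "\r\n" if "\r\n" in sdp else "\n"
--
--     def repl(m):
--         if m.group(1) == "ufrag":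
--             return f"a=ice-ufrag:{ufrag}{line_break}"
--         return f"a=ice-pwd:{ice_pwd}{line_break}"
--
--     return _ICE_LINE.sub(repl, sdp)
-- ===== Notes on version B (the rewrite author's own statement) =====
-- stated objective: idiomatic
-- what changed: Replaces A's splitlines(keepends)/loop/append/join pipeline with a single re.sub pass over the whole SDP: a line-anchored regex matches and consumes each a=ice-ufrag:/a=ice-pwd: line (including its terminator) and a replacement function inserts the new value with the normalised line break.
import Mathlib
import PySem

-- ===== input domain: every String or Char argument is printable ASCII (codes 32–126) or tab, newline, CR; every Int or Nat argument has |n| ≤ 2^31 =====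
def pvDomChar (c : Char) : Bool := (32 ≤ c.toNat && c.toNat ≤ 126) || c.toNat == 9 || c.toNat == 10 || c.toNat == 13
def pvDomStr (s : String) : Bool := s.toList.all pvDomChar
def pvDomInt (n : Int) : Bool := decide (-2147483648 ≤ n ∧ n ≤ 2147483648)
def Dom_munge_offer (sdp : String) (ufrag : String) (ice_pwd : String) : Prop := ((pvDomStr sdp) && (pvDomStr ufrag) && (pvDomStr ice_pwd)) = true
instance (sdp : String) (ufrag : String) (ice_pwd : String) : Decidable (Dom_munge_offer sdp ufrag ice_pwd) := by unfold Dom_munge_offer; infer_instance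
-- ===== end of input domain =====

-- B replaces A's splitlines/loop/join with a single regex-substitution pass
-- (re.sub with a line-anchored pattern and a replacement function) over the
-- whole SDP string (objective: idiomatic, same cost).


-- ===== PORT A =====
-- Hand port of str.splitlines(keepends=True): CPython-style scan accumulating the current
-- line (reversed) and flushing it at each terminator. Exact on Dom (tab/printable/\n/\r only),
-- where the only line breaks are "\n", "\r" and "\r\n".
def pvSplitKeep : List Char → List Char → List (List Char)
  | [], acc => if acc = [] then [] else [acc.reverse]
  | '\r' :: '\n' :: rest, acc => (acc.reverse ++ ['\r', '\n']) :: pvSplitKeep rest []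
  | '\r' :: rest, acc => (acc.reverse ++ ['\r']) :: pvSplitKeep rest []
  | '\n' :: rest, acc => (acc.reverse ++ ['\n']) :: pvSplitKeep rest []
  | c :: rest, acc => pvSplitKeep rest (c :: acc)

def munge_offer (sdp : String) (ufrag : String) (ice_pwd : String) : String :=
  -- line_break = "\r\n" if "\r\n" in sdp else "\n"
  let lineBreak : List Char :=
    if PySem.Str.isIn "\r\n" sdp then ['\r', '\n'] else ['\n']
  -- lines = sdp.splitlines(keepends=True)
  let lines := pvSplitKeep sdp.toList []
  -- for line in lines: … new_lines.append(…)
  let newLines : List (List Char) :=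
    lines.foldl (fun acc line =>
      if PySem.Chars.startswith line "a=ice-ufrag:".toList then
        acc ++ [("a=ice-ufrag:".toList ++ ufrag.toList ++ lineBreak)]
      else if PySem.Chars.startswith line "a=ice-pwd:".toList then
        acc ++ [("a=ice-pwd:".toList ++ ice_pwd.toList ++ lineBreak)]
      else acc ++ [line]) []
  -- return "".join(new_lines)
  String.ofList newLines.flatten

-- ===== PORT B =====
-- Hand port of the fixed regex r"(?:^|(?<=[\r\n]))a=ice-(ufrag|pwd):[^\r\n]*(?:\r\n|\r|\n)?"
-- and of re.sub's left-to-right non-overlapping sweep; exact for this pattern.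
-- pvEat consumes the match body after the prefix: `[^\r\n]*(?:\r\n|\r|\n)?`.
def pvEat : List Char → List Char
  | [] => []
  | '\r' :: '\n' :: rest => rest
  | '\r' :: rest => rest
  | '\n' :: rest => rest
  | _ :: rest => pvEat rest

theorem pvEat_length_lt : ∀ (s : List Char), s ≠ [] → (pvEat s).length < s.length := by
  intro s h
  induction s using pvEat.induct with
  | case1 => exact absurd rfl h
  | case2 rest => simp [pvEat]
  | case3 rest h1 =>
    have : pvEat ('\r' :: rest) = rest := by rw [pvEat.eq_def]; split <;> simp_all [eq_comm]
    simp [this]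
  | case4 rest =>
    have : pvEat ('\n' :: rest) = rest := by rw [pvEat.eq_def]; split <;> simp_all [eq_comm]
    simp [this]
  | case5 c rest h1 h2 h3 ih =>
    have : pvEat (c :: rest) = pvEat rest := by rw [pvEat.eq_def]; split <;> simp_all
    rw [this]
    rcases rest with _ | ⟨d, t⟩
    · simp [pvEat]
    · exact Nat.lt_succ_of_lt (ih (by simp))

-- re.sub's sweep: `atLS` is the lookbehind alternative (?:^|(?<=[\r\n])) — start of string
-- or just after '\r'/'\n'.  At a successful match the replacement function's value is
-- emitted and the match (prefix + body + optional terminator) is consumed; the sweep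
-- resumes at the match end, which is a line start again (a terminator was consumed, or
-- the string ended).  At a failed position one character is copied and the sweep advances.
def pvSub (uf pw lb : List Char) : Bool → List Char → List Char
  | _, [] => []
  | atLS, c :: rest =>
    if atLS && PySem.Chars.startswith (c :: rest) "a=ice-ufrag:".toList then
      "a=ice-ufrag:".toList ++ uf ++ lb ++ pvSub uf pw lb true (pvEat (c :: rest))
    else if atLS && PySem.Chars.startswith (c :: rest) "a=ice-pwd:".toList then
      "a=ice-pwd:".toList ++ pw ++ lb ++ pvSub uf pw lb true (pvEat (c :: rest))
    else c :: pvSub uf pw lb (c == '\r' || c == '\n') rest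
  termination_by _ s => s.length
  decreasing_by
    · exact pvEat_length_lt _ (List.cons_ne_nil _ _)
    · exact pvEat_length_lt _ (List.cons_ne_nil _ _)
    · simp

def munge_offer_alt (sdp : String) (ufrag : String) (ice_pwd : String) : String :=
  let lineBreak : List Char :=
    if PySem.Str.isIn "\r\n" sdp then ['\r', '\n'] else ['\n']
  String.ofList (pvSub ufrag.toList ice_pwd.toList lineBreak true sdp.toList)

-- ===== PRECONDITION & SPEC =====
def Spec_munge_offer (sdp : String) (ufrag : String) (ice_pwd : String) (out : String) : Prop := out = munge_offer_alt sdp ufrag ice_pwd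
instance (sdp : String) (ufrag : String) (ice_pwd : String) (out : String) : Decidable (Spec_munge_offer sdp ufrag ice_pwd out) := by unfold Spec_munge_offer; infer_instance

-- ===== CLAIM (what is proved, stated in full; the proofs are below) =====
def Claim_equal_munge_offer : Prop := ∀ (sdp : String) (ufrag : String) (ice_pwd : String), Dom_munge_offer sdp ufrag ice_pwd → Spec_munge_offer sdp ufrag ice_pwd (munge_offer sdp ufrag ice_pwd)

-- ===== LEMMAS AND PROOFS =====

-- proof helper: the accumulator-free line splitter
def pvLineB : List Char → List Char × List Char
  | [] => ([], [])
  | '\r' :: '\n' :: rest => (['\r', '\n'], rest)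
  | '\r' :: rest => (['\r'], rest)
  | '\n' :: rest => (['\n'], rest)
  | c :: rest =>
    let p := pvLineB rest
    (c :: p.1, p.2)

theorem pvLineB_cons (c : Char) (rest : List Char) (h1 : c ≠ '\r') (h2 : c ≠ '\n') :
    pvLineB (c :: rest) = (c :: (pvLineB rest).1, (pvLineB rest).2) := by
  rw [pvLineB.eq_def]
  split <;> simp_all

theorem pvLineB_rest_lt : ∀ (s : List Char), s ≠ [] → (pvLineB s).2.length < s.length := by
  intro s
  induction s using pvLineB.induct with
  | case1 => intro h; exact absurd rfl h
  | case2 rest => intro _; simp [pvLineB]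
  | case3 rest h =>
    intro _
    have hl : pvLineB ('\r' :: rest) = (['\r'], rest) := by
      rw [pvLineB.eq_def]; split <;> simp_all [eq_comm]
    simp [hl]
  | case4 rest =>
    intro _
    have hl : pvLineB ('\n' :: rest) = (['\n'], rest) := by
      rw [pvLineB.eq_def]; split <;> simp_all [eq_comm]
    simp [hl]
  | case5 c rest h1 h2 h3 ih =>
    intro _
    rw [pvLineB_cons c rest (fun hh => h2 hh) (fun hh => h3 hh)]
    rcases rest with _ | ⟨d, t⟩
    · simp [pvLineB]
    · exact Nat.lt_succ_of_lt (ih (by simp))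

def pvLines : List Char → List (List Char)
  | [] => []
  | c :: rest => (pvLineB (c :: rest)).1 :: pvLines (pvLineB (c :: rest)).2
  termination_by s => s.length
  decreasing_by exact pvLineB_rest_lt _ (List.cons_ne_nil _ _)

def pvNoBreak (l : List Char) : Prop := ∀ c ∈ l, c ≠ '\r' ∧ c ≠ '\n'

theorem pvLineB_append (a s : List Char) (h : pvNoBreak a) :
    pvLineB (a ++ s) = (a ++ (pvLineB s).1, (pvLineB s).2) := by
  induction a with
  | nil => simp
  | cons c a ih =>
    have hc := h c (by simp)
    rw [List.cons_append, pvLineB_cons c _ hc.1 hc.2,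
      ih (fun d hd => h d (by simp [hd]))]
    simp

theorem pvLineB_self (a : List Char) (h : pvNoBreak a) : pvLineB a = (a, []) := by
  simpa [pvLineB] using pvLineB_append a [] h

theorem pvLines_ne (s : List Char) (h : s ≠ []) :
    pvLines s = (pvLineB s).1 :: pvLines (pvLineB s).2 := by
  rcases s with _ | ⟨c, t⟩
  · exact absurd rfl h
  · rw [pvLines]

theorem pvSplitKeep_eq_pvLines : ∀ (s acc : List Char), pvNoBreak acc →
    pvSplitKeep s acc = pvLines (acc.reverse ++ s) := by
  intro s acc
  induction s, acc using pvSplitKeep.induct with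
  | case1 =>
    intro _
    simp [pvSplitKeep, pvLines]
  | case2 acc hacc =>
    intro h
    have hrev : pvNoBreak acc.reverse := fun c hc => h c (List.mem_reverse.mp hc)
    rw [List.append_nil, pvSplitKeep, if_neg hacc]
    rw [pvLines_ne _ (by simpa using hacc), pvLineB_self _ hrev]
    simp [pvLines]
  | case3 rest acc ih =>
    intro h
    have hrev : pvNoBreak acc.reverse := fun c hc => h c (List.mem_reverse.mp hc)
    rw [pvSplitKeep, ih (by intro c hc; cases hc)]
    simp only [List.reverse_nil, List.nil_append]
    rw [pvLines_ne (acc.reverse ++ '\r' :: '\n' :: rest) (by simp),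
      pvLineB_append _ _ hrev]
    simp [pvLineB]
  | case4 rest acc hnot ih =>
    intro h
    have hrev : pvNoBreak acc.reverse := fun c hc => h c (List.mem_reverse.mp hc)
    have hline : pvLineB ('\r' :: rest) = (['\r'], rest) := by
      rw [pvLineB.eq_def]; split <;> simp_all [eq_comm]
    rw [pvSplitKeep, ih (by intro c hc; cases hc)]
    simp only [List.reverse_nil, List.nil_append]
    rw [pvLines_ne (acc.reverse ++ '\r' :: rest) (by simp),
      pvLineB_append _ _ hrev, hline]
    exact hnot
  | case5 rest acc ih =>
    intro h
    have hrev : pvNoBreak acc.reverse := fun c hc => h c (List.mem_reverse.mp hc)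
    have hline : pvLineB ('\n' :: rest) = (['\n'], rest) := by
      rw [pvLineB.eq_def]; split <;> simp_all [eq_comm]
    rw [pvSplitKeep, ih (by intro c hc; cases hc)]
    simp only [List.reverse_nil, List.nil_append]
    rw [pvLines_ne (acc.reverse ++ '\n' :: rest) (by simp),
      pvLineB_append _ _ hrev, hline]
  | case6 c rest acc h1 h2 h3 ih =>
    intro h
    have hLHS : pvSplitKeep (c :: rest) acc = pvSplitKeep rest (c :: acc) := by
      rw [pvSplitKeep.eq_def]
      split <;> simp_all
    rw [hLHS, ih (by
      intro d hd
      rcases List.mem_cons.mp hd with hd | hd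
      · subst hd; exact ⟨fun hh => h2 hh, fun hh => h3 hh⟩
      · exact h d hd)]
    simp

theorem pvLineB_parts : ∀ (s : List Char), (pvLineB s).1 ++ (pvLineB s).2 = s := by
  intro s
  induction s with
  | nil => simp [pvLineB]
  | cons c rest ih =>
    rw [pvLineB.eq_def]
    split <;> simp_all

theorem prefix_line_iff (p s : List Char) (hp : pvNoBreak p) :
    (p <+: (pvLineB s).1) ↔ (p <+: s) := by
  constructor
  · intro h
    exact h.trans ⟨(pvLineB s).2, pvLineB_parts s⟩
  · intro h
    induction p generalizing s with
    | nil => simp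
    | cons c p' ih =>
      have hc := hp c (by simp)
      rcases h with ⟨t, ht⟩
      subst ht
      rw [show (c :: p') ++ t = c :: (p' ++ t) from rfl,
        pvLineB_cons c _ hc.1 hc.2]
      exact List.cons_prefix_cons.mpr ⟨rfl, ih (p' ++ t) (fun d hd => hp d (by simp [hd])) ⟨t, rfl⟩⟩

theorem pvNoBreak_ufrag : pvNoBreak "a=ice-ufrag:".toList := by
  have h : "a=ice-ufrag:".toList = ['a','=','i','c','e','-','u','f','r','a','g',':'] := rfl
  rw [h]; intro c hc; fin_cases hc <;> exact ⟨by decide, by decide⟩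
theorem pvNoBreak_pwd : pvNoBreak "a=ice-pwd:".toList := by
  have h : "a=ice-pwd:".toList = ['a','=','i','c','e','-','p','w','d',':'] := rfl
  rw [h]; intro c hc; fin_cases hc <;> exact ⟨by decide, by decide⟩

theorem startswith_line (p s : List Char) (hp : pvNoBreak p) :
    PySem.Chars.startswith (pvLineB s).1 p = PySem.Chars.startswith s p := by
  rcases hb : PySem.Chars.startswith s p
  · rcases hb2 : PySem.Chars.startswith (pvLineB s).1 p
    · rfl
    · have := (prefix_line_iff p s hp).mp ((PySem.Chars.startswith_iff _ _).mp hb2)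
      rw [← PySem.Chars.startswith_iff] at this
      simp [hb] at this
  · exact (PySem.Chars.startswith_iff _ _).mpr
      ((prefix_line_iff p s hp).mpr ((PySem.Chars.startswith_iff _ _).mp hb))

theorem foldl_append_map {α β : Type} (g : α → β) :
    ∀ (lines : List α) (init : List β),
      lines.foldl (fun acc l => acc ++ [g l]) init = init ++ lines.map g := by
  intro lines
  induction lines with
  | nil => simp
  | cons l ls ih => intro init; simp [List.foldl_cons, ih]

-- the renderer A applies to each keepends-line
def pvRender (uf pw lb : List Char) (line : List Char) : List Char :=
  if PySem.Chars.startswith line "a=ice-ufrag:".toList then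
    "a=ice-ufrag:".toList ++ uf ++ lb
  else if PySem.Chars.startswith line "a=ice-pwd:".toList then
    "a=ice-pwd:".toList ++ pw ++ lb
  else line

-- a string whose head is '\r' or '\n' never matches either prefix
theorem startswith_break_false (s : List Char) (c : Char) (h : c = '\r' ∨ c = '\n')
    (p : List Char) (hp : pvNoBreak p) (hne : p ≠ []) :
    PySem.Chars.startswith (c :: s) p = false := by
  rcases p with _ | ⟨d, p'⟩
  · exact absurd rfl hne
  · have hd := hp d (by simp)
    rcases hb : PySem.Chars.startswith (c :: s) (d :: p')
    · rfl
    · have := (PySem.Chars.startswith_iff _ _).mp hb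
      rcases this with ⟨t, ht⟩
      have : d = c := by injection ht
      rcases h with h | h <;> subst h <;> simp_all

theorem pvSub_break_step (uf pw lb : List Char) (atLS : Bool) (c : Char)
    (h : c = '\r' ∨ c = '\n') (rest : List Char) :
    pvSub uf pw lb atLS (c :: rest) = c :: pvSub uf pw lb true rest := by
  rw [pvSub]
  rw [startswith_break_false rest c h _ pvNoBreak_ufrag (by decide),
    startswith_break_false rest c h _ pvNoBreak_pwd (by decide)]
  rcases h with h | h <;> subst h <;> simp

-- pvSub away from a line start copies the current line verbatim and resumes at the next line
theorem pvSub_false_line (uf pw lb : List Char) : ∀ (s : List Char),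
    pvSub uf pw lb false s = (pvLineB s).1 ++ pvSub uf pw lb true (pvLineB s).2 := by
  intro s
  induction s using pvLineB.induct with
  | case1 => simp [pvSub, pvLineB]
  | case2 rest =>
    rw [pvSub_break_step uf pw lb false '\r' (Or.inl rfl),
      pvSub_break_step uf pw lb true '\n' (Or.inr rfl)]
    simp [pvLineB]
  | case3 rest h =>
    have hl : pvLineB ('\r' :: rest) = (['\r'], rest) := by
      rw [pvLineB.eq_def]; split <;> simp_all [eq_comm]
    rw [pvSub_break_step uf pw lb false '\r' (Or.inl rfl), hl]
    simp
  | case4 rest =>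
    have hl : pvLineB ('\n' :: rest) = (['\n'], rest) := by
      rw [pvLineB.eq_def]; split <;> simp_all [eq_comm]
    rw [pvSub_break_step uf pw lb false '\n' (Or.inr rfl), hl]
    simp
  | case5 c rest h1 h2 h3 ih =>
    have hc1 : c ≠ '\r' := fun hh => h2 hh
    have hc2 : c ≠ '\n' := fun hh => h3 hh
    rw [pvSub, pvLineB_cons c rest hc1 hc2]
    simp only [Bool.false_and, if_neg (by simp : ¬ (false = true)),
      show (c == '\r' || c == '\n') = false by simp [hc1, hc2]]
    rw [ih]
    simp

-- pvSub at a line start with no match on the line: same copy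
theorem pvSub_true_nomatch (uf pw lb : List Char) (s : List Char)
    (h1 : PySem.Chars.startswith s "a=ice-ufrag:".toList = false)
    (h2 : PySem.Chars.startswith s "a=ice-pwd:".toList = false) :
    pvSub uf pw lb true s = (pvLineB s).1 ++ pvSub uf pw lb true (pvLineB s).2 := by
  have : pvSub uf pw lb true s = pvSub uf pw lb false s := by
    rcases s with _ | ⟨c, rest⟩
    · simp [pvSub]
    · rw [pvSub, pvSub, h1, h2]
      simp
  rw [this, pvSub_false_line]

theorem pvEat_eq (s : List Char) : pvEat s = (pvLineB s).2 := by
  induction s using pvLineB.induct with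
  | case1 => simp [pvEat, pvLineB]
  | case2 rest => simp [pvEat, pvLineB]
  | case3 rest h =>
    have hl : pvLineB ('\r' :: rest) = (['\r'], rest) := by
      rw [pvLineB.eq_def]; split <;> simp_all [eq_comm]
    have he : pvEat ('\r' :: rest) = rest := by
      rw [pvEat.eq_def]; split <;> simp_all [eq_comm]
    rw [hl, he]
  | case4 rest =>
    have hl : pvLineB ('\n' :: rest) = (['\n'], rest) := by
      rw [pvLineB.eq_def]; split <;> simp_all [eq_comm]
    have he : pvEat ('\n' :: rest) = rest := by
      rw [pvEat.eq_def]; split <;> simp_all [eq_comm]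
    rw [hl, he]
  | case5 c rest h1 h2 h3 ih =>
    have he : pvEat (c :: rest) = pvEat rest := by
      rw [pvEat.eq_def]; split <;> simp_all
    rw [he, pvLineB_cons c rest (fun hh => h2 hh) (fun hh => h3 hh), ih]

-- the main bridge: B's sweep = render each keepends-line and concatenate
theorem pvSub_eq_flatten (uf pw lb : List Char) : ∀ (s : List Char),
    pvSub uf pw lb true s = ((pvLines s).map (pvRender uf pw lb)).flatten := by
  intro s
  induction s using pvLines.induct with
  | case1 => simp [pvSub, pvLines]
  | case2 c rest ih =>
    rw [pvLines]
    simp only [List.map_cons, List.flatten_cons]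
    rcases h1 : PySem.Chars.startswith (c :: rest) "a=ice-ufrag:".toList
    · rcases h2 : PySem.Chars.startswith (c :: rest) "a=ice-pwd:".toList
      · rw [pvSub_true_nomatch uf pw lb _ h1 h2, ih]
        have : pvRender uf pw lb (pvLineB (c :: rest)).1 = (pvLineB (c :: rest)).1 := by
          unfold pvRender
          rw [startswith_line _ _ pvNoBreak_ufrag, startswith_line _ _ pvNoBreak_pwd, h1, h2]
          simp
        rw [this]
      · rw [pvSub, h1, h2]
        simp only [Bool.true_and, if_neg (by simp : ¬ (false = true))]
        rw [pvEat_eq, ih]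
        have : pvRender uf pw lb (pvLineB (c :: rest)).1 =
            "a=ice-pwd:".toList ++ pw ++ lb := by
          unfold pvRender
          rw [startswith_line _ _ pvNoBreak_ufrag, startswith_line _ _ pvNoBreak_pwd, h1, h2]
          simp
        rw [this]
        simp
    · rw [pvSub, h1]
      simp only [Bool.true_and]
      rw [pvEat_eq, ih]
      have : pvRender uf pw lb (pvLineB (c :: rest)).1 =
          "a=ice-ufrag:".toList ++ uf ++ lb := by
        unfold pvRender
        rw [startswith_line _ _ pvNoBreak_ufrag, h1]
        simp
      rw [this]
      simp

theorem mainA_eq (uf pw lb : List Char) (s : List Char) :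
    (List.foldl (fun acc line =>
      if PySem.Chars.startswith line "a=ice-ufrag:".toList then
        acc ++ [("a=ice-ufrag:".toList ++ uf ++ lb)]
      else if PySem.Chars.startswith line "a=ice-pwd:".toList then
        acc ++ [("a=ice-pwd:".toList ++ pw ++ lb)]
      else acc ++ [line]) [] (pvSplitKeep s [])).flatten = pvSub uf pw lb true s := by
  have hfun : (fun (acc : List (List Char)) line =>
      if PySem.Chars.startswith line "a=ice-ufrag:".toList then
        acc ++ [("a=ice-ufrag:".toList ++ uf ++ lb)]
      else if PySem.Chars.startswith line "a=ice-pwd:".toList then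
        acc ++ [("a=ice-pwd:".toList ++ pw ++ lb)]
      else acc ++ [line])
      = (fun (acc : List (List Char)) line => acc ++ [pvRender uf pw lb line]) := by
    funext acc line
    unfold pvRender
    split_ifs <;> rfl
  rw [hfun, foldl_append_map, pvSplitKeep_eq_pvLines s [] (by intro c hc; cases hc)]
  simp only [List.reverse_nil, List.nil_append]
  rw [pvSub_eq_flatten]

-- ===== VERDICT (by name: the statement is the Claim_ definition above) =====
theorem munge_offer_spec : Claim_equal_munge_offer := by
  intro sdp ufrag ice_pwd _
  unfold Spec_munge_offer munge_offer munge_offer_alt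
  simp only
  rw [mainA_eq]
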